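-- pv_equiv track=rewrite | github.com/dohyeongkim97/programmers | 프로그래머스/3/12938. 최고의 집합/최고의 집합.py | solution
-- ===== SOURCE A (Python) =====
-- def solution(n, s):
--
--     if n>s:
--         answer = [-1]
--         return answer
--
--     answer = [(s//n) for _ in range(n)]
--
--     elses = s - (s//n)*n
--
--     i = 0
--     while elses>0:
--         answer[n-i-1] += 1
--         elses -= 1
--         i += 1
--
--
--     return answer
-- ===== SOURCE B (Python) =====
-- def solution(n, s):
--     if n > s:
--         return [-1]
--     answer = []
--     while n > 0:
--         q = s // n
--         answer.append(q)
--         s -= q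
--         n -= 1
--     return answer
-- ===== Notes on version B (the rewrite author's own statement) =====
-- stated objective: alternative
-- what changed: Instead of pre-filling n copies of s//n and patching the last r cells with a remainder loop, B builds the list greedily element by element: each step appends s//n for the REMAINING count n and subtracts it from the remaining sum, so no remainder is ever computed or distributed.
import Mathlib
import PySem

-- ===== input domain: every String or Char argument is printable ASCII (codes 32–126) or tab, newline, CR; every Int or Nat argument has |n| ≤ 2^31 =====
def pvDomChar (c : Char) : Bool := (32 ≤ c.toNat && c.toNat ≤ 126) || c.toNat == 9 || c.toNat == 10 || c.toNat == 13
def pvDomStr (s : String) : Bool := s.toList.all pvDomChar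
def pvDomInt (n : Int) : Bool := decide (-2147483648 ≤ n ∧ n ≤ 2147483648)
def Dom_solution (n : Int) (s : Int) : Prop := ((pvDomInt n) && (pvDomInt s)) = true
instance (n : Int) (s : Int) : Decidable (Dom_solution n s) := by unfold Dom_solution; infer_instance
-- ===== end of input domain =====

-- B replaces A's fill-then-patch construction (n copies of s//n, then a remainder loop
-- adding 1 to the last cells) by a greedy per-element loop: append s//n for the REMAINING
-- count and subtract it from the remaining sum (objective: alternative, same cost).

-- ===== PORT A =====
-- the while loop: answer[n-i-1] += 1; elses -= 1; i += 1
def solutionLoopA (n : Int) (answer : List Int) (elses : Int) (i : Int) : List Int :=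
  if 0 < elses then
    solutionLoopA n
      (PySem.List.pySetD answer (n - i - 1) (PySem.List.pyGetD answer (n - i - 1) 0 + 1))
      (elses - 1) (i + 1)
  else answer
termination_by elses.toNat
decreasing_by omega

def solution (n : Int) (s : Int) : List Int :=
  if n > s then [-1]
  else
    let answer := (PySem.List.pyRange 0 n 1).map (fun _ => PySem.Int.floordiv s n)
    let elses := s - (PySem.Int.floordiv s n) * n
    solutionLoopA n answer elses 0

-- ===== PORT B =====
-- the while loop of Source B: q = s // n; answer.append(q); s -= q; n -= 1
def solutionLoopB (n : Int) (s : Int) (answer : List Int) : List Int :=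
  if 0 < n then
    let q := PySem.Int.floordiv s n
    solutionLoopB (n - 1) (s - q) (answer ++ [q])
  else answer
termination_by n.toNat
decreasing_by omega

def solution_alt (n : Int) (s : Int) : List Int :=
  if n > s then [-1]
  else solutionLoopB n s []

-- ===== PRECONDITION & SPEC =====
-- Pre_ excludes exactly n = 0 ∧ 0 ≤ s, where A raises ZeroDivisionError on s // n.
def Pre_solution (n : Int) (s : Int) : Prop := ¬ (n = 0 ∧ 0 ≤ s)
instance (n : Int) (s : Int) : Decidable (Pre_solution n s) := by unfold Pre_solution; infer_instance
def pvWitness_solution : Int × Int := (3, 7)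

def Spec_solution (n : Int) (s : Int) (out : List Int) : Prop := out = solution_alt n s
instance (n : Int) (s : Int) (out : List Int) : Decidable (Spec_solution n s out) := by unfold Spec_solution; infer_instance

-- ===== CLAIM (what is proved, stated in full; the proofs are below) =====
def Claim_equal_solution : Prop := ∀ (n : Int) (s : Int), Dom_solution n s → Pre_solution n s → Spec_solution n s (solution n s)

-- ===== LEMMAS AND PROOFS =====

-- A-side loop invariant: after i = b iterations the last b cells hold q+1; e more iterations move e more cells.
theorem solutionLoopA_inv (e : Nat) : ∀ (m b : Nat) (q n i : Int),
    n = (m : Int) + b → i = (b : Int) → e ≤ m →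
    solutionLoopA n (List.replicate m q ++ List.replicate b (q + 1)) (e : Int) i
      = List.replicate (m - e) q ++ List.replicate (b + e) (q + 1) := by
  induction e with
  | zero =>
    intro m b q n i hn hi he
    rw [solutionLoopA]
    simp
  | succ e ih =>
    intro m b q n i hn hi he
    rw [solutionLoopA]
    have hpos : (0 : Int) < ((e + 1 : Nat) : Int) := by positivity
    rw [if_pos hpos]
    have hm1 : 1 ≤ m := by omega
    have hidx : n - i - 1 = ((m - 1 : Nat) : Int) := by omega
    have hlt : m - 1 < (List.replicate m q ++ List.replicate b (q + 1)).length := by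
      simp; omega
    rw [hidx, PySem.List.pyGetD_natCast, PySem.List.pySetD_natCast]
    have hget : (List.replicate m q ++ List.replicate b (q + 1)).getD (m - 1) 0 = q := by
      rw [List.getD_eq_getElem _ _ hlt]
      rw [List.getElem_append_left (by simp; omega)]
      simp
    have hset : (List.replicate m q ++ List.replicate b (q + 1)).set (m - 1) (q + 1)
        = List.replicate (m - 1) q ++ List.replicate (b + 1) (q + 1) := by
      have hrep : List.replicate m q = List.replicate (m - 1) q ++ [q] := by
        have : m = (m - 1) + 1 := by omega
        rw [this]
        simp [List.replicate_succ']
      rw [hrep, List.append_assoc, List.set_append]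
      simp only [List.length_replicate]
      rw [if_neg (by omega)]
      have : m - 1 - (m - 1) = 0 := by omega
      rw [this]
      simp [List.replicate_succ]
    rw [hget, hset]
    have hcast : ((e + 1 : Nat) : Int) - 1 = (e : Int) := by omega
    rw [hcast]
    have := ih (m - 1) (b + 1) q n (i + 1) (by omega) (by omega) (by omega)
    rw [this]
    congr 1 <;> congr 1 <;> omega

theorem map_const_pyRange (n : Nat) (q : Int) :
    (PySem.List.pyRange 0 (n : Int) 1).map (fun _ => q) = List.replicate n q := by
  rw [PySem.List.pyRange_one]
  rw [List.map_map]
  rw [show ((fun _ : Int => q) ∘ fun k : Nat => ((0:Int) + k)) = (fun _ : Nat => q) from rfl]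
  rw [List.map_const', List.length_range]
  rw [show ((n : Int) - 0).toNat = n by omega]

-- B-side loop: on remaining count m and remaining sum q*m + r (0 ≤ r < m) the greedy loop
-- appends exactly (m - r) copies of q followed by r copies of q + 1.
theorem solutionLoopB_eq (m : Nat) : ∀ (q r : Int) (acc : List Int), 0 ≤ r → r < (m : Int) →
    solutionLoopB (m : Int) (q * m + r) acc
      = acc ++ (List.replicate (m - r.toNat) q ++ List.replicate r.toNat (q + 1)) := by
  induction m with
  | zero => intro q r acc h0 h1; omega
  | succ m ih =>
    intro q r acc h0 h1
    rw [solutionLoopB]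
    have hpos : (0 : Int) < ((m + 1 : Nat) : Int) := by positivity
    rw [if_pos hpos]
    have hq : PySem.Int.floordiv (q * ((m + 1 : Nat) : Int) + r) ((m + 1 : Nat) : Int) = q := by
      rw [PySem.Int.floordiv_eq_iff_of_pos hpos]
      constructor <;> nlinarith
    simp only [hq]
    have hrest : q * ((m + 1 : Nat) : Int) + r - q = q * (m : Int) + r := by push_cast; ring
    rw [show ((m + 1 : Nat) : Int) - 1 = (m : Int) by push_cast; ring, hrest]
    by_cases hrm : r < (m : Int)
    · rw [ih q r (acc ++ [q]) h0 hrm]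
      have h2 : m + 1 - r.toNat = (m - r.toNat) + 1 := by omega
      rw [h2, List.replicate_succ]
      simp
    · -- r = m: remaining sum is (q+1)*m, loop continues with quotient q+1 and remainder 0
      have hrm' : r = (m : Int) := by omega
      have : q * (m : Int) + r = (q + 1) * (m : Int) + 0 := by rw [hrm']; ring
      rw [this]
      by_cases hm0 : m = 0
      · subst hm0
        rw [solutionLoopB, if_neg (by simp)]
        have : r.toNat = 0 := by omega
        simp [this]
      · rw [ih (q + 1) 0 (acc ++ [q]) le_rfl (by exact_mod_cast Nat.pos_of_ne_zero hm0)]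
        have h2 : r.toNat = m := by omega
        have h3 : m + 1 - m = 1 := by omega
        simp [h2, h3, List.replicate_succ]

-- ===== VERDICT (by name: the statement is the Claim_ definition above) =====
theorem solution_spec : Claim_equal_solution := by
  intro n s _ hpre
  unfold Spec_solution solution solution_alt
  by_cases hns : n > s
  · simp [hns]
  · rw [if_neg hns, if_neg hns]
    have hn0 : n ≠ 0 := by
      intro h; exact hpre ⟨h, by omega⟩
    set q := PySem.Int.floordiv s n with hq
    set r := PySem.Int.mod s n with hr
    have hsum : q * n + r = s := PySem.Int.floordiv_mul_add_mod s n
    have helses : s - q * n = r := by omega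
    rw [helses]
    rcases lt_or_gt_of_ne hn0 with hneg | hpos
    · -- n < 0: A's range is empty and its loop does not run (r ≤ 0); B's loop does not run either
      have hb := PySem.Int.mod_neg_bounds s hneg
      have hrng : PySem.List.pyRange 0 n 1 = [] := by
        rw [PySem.List.pyRange_one]
        have h0 : (n - 0).toNat = 0 := by omega
        rw [h0]; simp
      rw [hrng]
      rw [solutionLoopA, if_neg (by omega)]
      rw [solutionLoopB, if_neg (by omega)]
      simp
    · -- n > 0
      have hb1 : 0 ≤ r := PySem.Int.mod_nonneg s hpos
      have hb2 : r < n := PySem.Int.mod_lt s hpos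
      have hcn : n = ((n.toNat : Nat) : Int) := by omega
      have hcr : r = ((r.toNat : Nat) : Int) := by omega
      rw [hcn, map_const_pyRange n.toNat q]
      have hmap : List.replicate n.toNat q
          = List.replicate n.toNat q ++ List.replicate 0 (q + 1) := by simp
      rw [hmap, hcr]
      rw [solutionLoopA_inv r.toNat n.toNat 0 q _ 0 (by omega) (by omega) (by omega)]
      have hs : s = q * ((n.toNat : Nat) : Int) + ((r.toNat : Nat) : Int) := by
        rw [← hcn, ← hcr]; omega
      rw [hs, solutionLoopB_eq n.toNat q ((r.toNat : Nat) : Int) [] (by omega) (by omega)]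
      simp
      congr 2 <;> omega
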